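-- pv_equiv track=rewrite | github.com/krtvand/tornado_proxy | main.py | find_dest_host_by_term_id
-- ===== SOURCE A (Python) =====
-- MAP = {
--     '127.0.0.1:77': {x for x in range(7700, 7799)},
--     '127.0.0.1:78': {x for x in range(7800, 7899)}
-- }
--
-- DEFAULT_DESTINATION = '127.0.0.1:77'
--
-- def find_dest_host_by_term_id(terminal_id):
--     for dest in MAP:
--         if terminal_id in MAP[dest]:
--             destination = dest
--             break
--     else:
--         destination = DEFAULT_DESTINATION
--     return destination
-- ===== SOURCE B (Python) =====
-- DEFAULT_DESTINATION = '127.0.0.1:77'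
--
-- def find_dest_host_by_term_id(terminal_id):
--     # arithmetic range test instead of scanning the MAP of materialised sets;
--     # the :77 range falls through to the identical default
--     return '127.0.0.1:78' if 7800 <= terminal_id <= 7898 else DEFAULT_DESTINATION
-- ===== Notes on version B (the rewrite author's own statement) =====
-- stated objective: simpler
-- what changed: Replaces the for/else scan of a dict of two materialised id-sets with a single arithmetic bounds test (only the :78 interval needs testing, since the :77 interval and the miss case both yield the default '127.0.0.1:77').
import Mathlib
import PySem

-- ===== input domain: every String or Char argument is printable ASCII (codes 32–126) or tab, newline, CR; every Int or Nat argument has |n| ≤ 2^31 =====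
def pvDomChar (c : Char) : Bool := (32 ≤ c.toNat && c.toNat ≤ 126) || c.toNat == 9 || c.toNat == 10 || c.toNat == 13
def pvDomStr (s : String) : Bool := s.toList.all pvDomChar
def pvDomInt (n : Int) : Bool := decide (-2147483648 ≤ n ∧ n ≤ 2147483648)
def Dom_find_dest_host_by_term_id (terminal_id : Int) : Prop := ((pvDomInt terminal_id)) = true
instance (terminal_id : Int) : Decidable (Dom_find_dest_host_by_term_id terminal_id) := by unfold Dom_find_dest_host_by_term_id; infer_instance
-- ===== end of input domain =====

-- B replaces A's for/else scan of a dict of two materialised sets by a single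
-- arithmetic bounds test (objective: simpler); return values agree on every Int.

-- ===== PORT A =====
-- module-level MAP: dict from destination to the set of terminal ids
def pvMAP : PySem.Dict String (PySem.Set Int) :=
  PySem.Dict.mk
    [("127.0.0.1:77", PySem.Set.ofList (PySem.List.pyRange 7700 7799 1)),
     ("127.0.0.1:78", PySem.Set.ofList (PySem.List.pyRange 7800 7899 1))]

def pvDEFAULT_DESTINATION : String := "127.0.0.1:77"

-- the for…else loop over MAP's keys: first dest whose set contains terminal_id, else default
def pvFindLoop (terminal_id : Int) : List String → String
  | [] => pvDEFAULT_DESTINATION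
  | dest :: rest =>
      if terminal_id ∈ PySem.Dict.getD pvMAP dest PySem.Set.empty then dest
      else pvFindLoop terminal_id rest

def find_dest_host_by_term_id (terminal_id : Int) : String :=
  pvFindLoop terminal_id (PySem.Dict.keys pvMAP)

-- ===== PORT B =====
def find_dest_host_by_term_id_alt (terminal_id : Int) : String :=
  if 7800 ≤ terminal_id ∧ terminal_id ≤ 7898 then "127.0.0.1:78" else pvDEFAULT_DESTINATION

-- ===== PRECONDITION & SPEC =====
def Spec_find_dest_host_by_term_id (terminal_id : Int) (out : String) : Prop := out = find_dest_host_by_term_id_alt terminal_id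
instance (terminal_id : Int) (out : String) : Decidable (Spec_find_dest_host_by_term_id terminal_id out) := by unfold Spec_find_dest_host_by_term_id; infer_instance

-- ===== CLAIM (what is proved, stated in full; the proofs are below) =====
def Claim_equal_find_dest_host_by_term_id : Prop := ∀ (terminal_id : Int), Dom_find_dest_host_by_term_id terminal_id → Spec_find_dest_host_by_term_id terminal_id (find_dest_host_by_term_id terminal_id)

-- ===== LEMMAS AND PROOFS =====
theorem pvMem77 (t : Int) :
    (t ∈ PySem.Dict.getD pvMAP "127.0.0.1:77" PySem.Set.empty) ↔ (7700 ≤ t ∧ t < 7799) := by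
  simp [pvMAP, PySem.Dict.getD, PySem.Dict.get?, PySem.Set.mem_ofList, PySem.List.mem_pyRange_one]

theorem pvMem78 (t : Int) :
    (t ∈ PySem.Dict.getD pvMAP "127.0.0.1:78" PySem.Set.empty) ↔ (7800 ≤ t ∧ t < 7899) := by
  simp [pvMAP, PySem.Dict.getD, PySem.Dict.get?, PySem.Set.mem_ofList, PySem.List.mem_pyRange_one]

-- ===== VERDICT (by name: the statement is the Claim_ definition above) =====
theorem find_dest_host_by_term_id_spec : Claim_equal_find_dest_host_by_term_id := by
  intro t _
  show find_dest_host_by_term_id t = find_dest_host_by_term_id_alt t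
  unfold find_dest_host_by_term_id find_dest_host_by_term_id_alt
  rw [show PySem.Dict.keys pvMAP = ["127.0.0.1:77", "127.0.0.1:78"] from rfl]
  simp only [pvFindLoop]
  by_cases h1 : t ∈ PySem.Dict.getD pvMAP "127.0.0.1:77" PySem.Set.empty
  · have := (pvMem77 t).mp h1
    rw [if_pos h1, if_neg (by omega)]
    rfl
  · by_cases h2 : t ∈ PySem.Dict.getD pvMAP "127.0.0.1:78" PySem.Set.empty
    · have := (pvMem78 t).mp h2
      rw [if_neg h1, if_pos h2, if_pos (by omega)]
    · have n1 : ¬ (7700 ≤ t ∧ t < 7799) := fun h => h1 ((pvMem77 t).mpr h)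
      have n2 : ¬ (7800 ≤ t ∧ t < 7899) := fun h => h2 ((pvMem78 t).mpr h)
      rw [if_neg h1, if_neg h2, if_neg (by omega)]
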